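-- pv_equiv track=rewrite | github.com/Tushar-ml/G2RL-Path-Planning | map_generator.py | heuristic_generator
-- ===== SOURCE A (Python) =====
-- def heuristic_generator(arr, end):
--     try:
--         h,w = arr.shape
--     except:
--         h,w = len(arr), len(arr[0])
--     h_map = [[0 for i in range(w)] for j in range(h)]
--     for i in range(h):
--         for j in range(w):
--             h_map[i][j] = abs(end[0] - i) + abs(end[1] - j)
--
--     return h_map
-- ===== SOURCE B (Python) =====
-- def heuristic_generator(arr, end):
--     try:
--         h, w = arr.shape
--     except:
--         h, w = len(arr), len(arr[0])
--
--     def dist1d(e, n):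
--         # [|e - k| for k in range(n)] assembled without abs, as the
--         # concatenation of (at most) two arithmetic ranges: the distances
--         # descend while k < e and ascend afterwards.
--         m = min(max(e, 0), n)
--         return list(range(e, e - m, -1)) + list(range(m - e, n - e))
--
--     col = dist1d(end[1], w)
--     return [[r + c for c in col] for r in dist1d(end[0], h)]
-- ===== Notes on version B (the rewrite author's own statement) =====
-- stated objective: alternative
-- what changed: Replaces the per-cell abs computation of the nested loop by a piecewise construction: each 1D distance profile is assembled as the concatenation of a descending and an ascending arithmetic range (no abs anywhere), and the grid is the outer sum of the two profiles.
import Mathlib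
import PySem

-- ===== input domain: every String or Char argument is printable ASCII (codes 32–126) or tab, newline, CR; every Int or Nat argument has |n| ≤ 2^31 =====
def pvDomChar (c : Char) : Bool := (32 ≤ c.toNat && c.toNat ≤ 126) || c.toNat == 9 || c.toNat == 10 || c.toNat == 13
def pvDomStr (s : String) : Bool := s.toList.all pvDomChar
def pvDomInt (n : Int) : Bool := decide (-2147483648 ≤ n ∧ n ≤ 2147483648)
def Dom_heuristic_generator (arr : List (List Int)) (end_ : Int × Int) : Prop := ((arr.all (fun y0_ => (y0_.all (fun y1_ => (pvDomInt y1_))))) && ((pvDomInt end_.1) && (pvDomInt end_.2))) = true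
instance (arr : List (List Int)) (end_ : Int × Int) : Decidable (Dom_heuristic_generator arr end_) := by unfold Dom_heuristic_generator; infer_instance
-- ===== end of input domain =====

-- B builds each 1D distance profile as two arithmetic ranges (no abs) and takes their outer sum; same results as A's per-cell nested loop (alternative construction).

-- ===== PORT A =====
-- Transliteration of A: h,w = len(arr), len(arr[0]) (a list has no .shape);
-- nested loop filling h_map[i][j] = |end[0]-i| + |end[1]-j|.
def heuristic_generator (arr : List (List Int)) (end_ : Int × Int) : List (List Int) :=
  let h : Int := arr.length
  let w : Int := (arr.headD []).length   -- arr[0]; Pre_ excludes arr = [] where Python raises IndexError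
  (PySem.List.pyRange 0 h 1).map (fun i =>
    (PySem.List.pyRange 0 w 1).map (fun j => |end_.1 - i| + |end_.2 - j|))

-- ===== PORT B =====
-- dist1d e n = [|e-k| for k in range(n)] as range(e, e-m, -1) ++ range(m-e, n-e)
def pvDist1d (e n : Int) : List Int :=
  let m := min (max e 0) n
  PySem.List.pyRange e (e - m) (-1) ++ PySem.List.pyRange (m - e) (n - e) 1

def heuristic_generator_alt (arr : List (List Int)) (end_ : Int × Int) : List (List Int) :=
  let h : Int := arr.length
  let w : Int := (arr.headD []).length
  let col := pvDist1d end_.2 w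
  (pvDist1d end_.1 h).map (fun r => col.map (fun c => r + c))

-- ===== PRECONDITION & SPEC =====
-- Pre_ excludes arr = [], on which Python A raises IndexError at arr[0].
def Pre_heuristic_generator (arr : List (List Int)) (end_ : Int × Int) : Prop := arr ≠ []
instance (arr : List (List Int)) (end_ : Int × Int) : Decidable (Pre_heuristic_generator arr end_) := by unfold Pre_heuristic_generator; infer_instance
def pvWitness_heuristic_generator : List (List Int) × (Int × Int) := ([[0, 1], [2, 3]], (1, 0))
def Spec_heuristic_generator (arr : List (List Int)) (end_ : Int × Int) (out : List (List Int)) : Prop := out = heuristic_generator_alt arr end_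
instance (arr : List (List Int)) (end_ : Int × Int) (out : List (List Int)) : Decidable (Spec_heuristic_generator arr end_ out) := by unfold Spec_heuristic_generator; infer_instance

-- ===== CLAIM =====
def Claim_equal_heuristic_generator : Prop := ∀ (arr : List (List Int)) (end_ : Int × Int), Dom_heuristic_generator arr end_ → Pre_heuristic_generator arr end_ → Spec_heuristic_generator arr end_ (heuristic_generator arr end_)

-- ===== LEMMAS AND PROOFS =====
theorem pvDist1d_eq (e n : Int) (hn : 0 ≤ n) :
    (PySem.List.pyRange 0 n 1).map (fun k => |e - k|) = pvDist1d e n := by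
  unfold pvDist1d
  dsimp only
  rw [PySem.List.pyRange_one 0 n, PySem.List.pyRange_neg_one, PySem.List.pyRange_one]
  apply List.ext_getElem
  · simp; omega
  · intro k h1 h2
    simp only [List.getElem_map, List.getElem_range, List.length_map, List.length_range,
      List.getElem_append, List.getElem_map, List.getElem_range] at *
    have h1' : k < n.toNat := by simpa using h1
    split_ifs with hk
    · rw [abs_of_nonneg (by omega)]
      omega
    · rw [abs_of_nonpos (by omega)]
      omega

-- ===== VERDICT =====
theorem heuristic_generator_spec : Claim_equal_heuristic_generator := by
  intro arr end_ _ _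
  unfold Spec_heuristic_generator heuristic_generator heuristic_generator_alt
  dsimp only
  rw [← pvDist1d_eq end_.1 arr.length (by positivity),
      ← pvDist1d_eq end_.2 (arr.headD []).length (by positivity)]
  simp [List.map_map, Function.comp]
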